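-- pv_equiv track=rewrite | github.com/juliazadorozhnaya/ejudgePython | PatternFind.py | check
-- ===== SOURCE A (Python) =====
-- def check(s, p):
--     counter = 0
--     start = 0
--     good_index = -1
--     while start < len(s):
--         if s[start] == p[counter] or p[counter] == '@':
--             if counter == 0:
--                 good_index = start
--             counter += 1
--         else:
--             if counter != 0:
--                 if good_index != -1:
--                     start = good_index
--                 else:
--                     start -= 1
--             counter = 0
--         start += 1
--         if counter == len(p):
--             return good_index
--     return good_index if counter == len(p) else -1
-- ===== SOURCE B (Python) =====
-- def check(s, p):
--     m = len(p)
--     for i in range(len(s) - m + 1):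
--         if all(p[j] == '@' or p[j] == s[i + j] for j in range(m)):
--             return i
--     return -1
-- ===== Notes on version B (the rewrite author's own statement) =====
-- stated objective: simpler
-- what changed: Replaces A's single-pointer backtracking state machine (counter/start/good_index mutated across the while loop) with a direct nested scan: for each feasible start position, test every pattern position.
-- outside the precondition, e.g. on check('', ''): A returns -1, B returns 0
import Mathlib
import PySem

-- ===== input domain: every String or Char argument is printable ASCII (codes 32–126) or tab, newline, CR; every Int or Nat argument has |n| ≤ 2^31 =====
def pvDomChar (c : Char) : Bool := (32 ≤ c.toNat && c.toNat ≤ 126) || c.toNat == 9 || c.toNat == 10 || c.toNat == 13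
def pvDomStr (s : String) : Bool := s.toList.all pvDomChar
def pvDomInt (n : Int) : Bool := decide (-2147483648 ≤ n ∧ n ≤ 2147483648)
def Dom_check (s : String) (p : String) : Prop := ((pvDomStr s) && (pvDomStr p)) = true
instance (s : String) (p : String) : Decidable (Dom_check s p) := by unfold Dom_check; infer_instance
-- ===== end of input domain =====

-- B replaces A's single-pointer backtracking state machine by a plain
-- "for each start position, test every pattern position" scan (objective: simpler).

-- ===== PORT A =====
-- Literal port of A's while-loop as a fuel-indexed recursion over the state
-- (counter, start, good_index); the fuel (|s|+2)^2 is a strict upper bound on the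
-- number of iterations, proved never to run out (loop_eq below), so fuel is only a
-- totality device. The `| _, _ => -1` arm marks where Python raises IndexError
-- (p = "", excluded by Pre_check).
def checkLoop (sl pl : List Char) (m n : Int) : Nat → Int → Int → Int → Int
  | 0, _, _, _ => -1
  | fuel+1, c, st, g =>
    if st < n then
      match PySem.List.pyGet? sl st, PySem.List.pyGet? pl c with
      | some sc, some pc =>
        if sc == pc || pc == '@' then
          let g' := if c = 0 then st else g
          let c' := c + 1
          let st' := st + 1
          if c' = m then g' else checkLoop sl pl m n fuel c' st' g'
        else
          let st' := (if c ≠ 0 then (if g ≠ -1 then g else st - 1) else st) + 1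
          if (0 : Int) = m then g else checkLoop sl pl m n fuel 0 st' g
      | _, _ => -1
    else if c = m then g else -1

def check (s : String) (p : String) : Int :=
  checkLoop s.toList p.toList (p.toList.length : Int) (s.toList.length : Int)
    ((s.toList.length + 2) * (s.toList.length + 2)) 0 0 (-1)

-- ===== PORT B =====
-- all(p[j] == '@' or p[j] == s[i + j] for j in range(m)); the `| _, _ => false`
-- arm is unreachable for the indices B ever uses (Python never raises there).
def pmatch (sl pl : List Char) (i : Int) : Bool :=
  (PySem.List.pyRange 0 (pl.length : Int) 1).all (fun j =>
    match PySem.List.pyGet? pl j, PySem.List.pyGet? sl (i + j) with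
    | some pc, some sc => pc == '@' || pc == sc
    | _, _ => false)

def check_alt (s : String) (p : String) : Int :=
  match (PySem.List.pyRange 0 ((s.toList.length : Int) - (p.toList.length : Int) + 1) 1).find?
      (pmatch s.toList p.toList) with
  | some i => i
  | none => -1

-- ===== PRECONDITION & SPEC =====
-- Pre_ excludes the empty pattern, on which A raises IndexError for nonempty s and
-- returns the artefact -1 for empty s, while B returns the conventional 0.
def Pre_check (s : String) (p : String) : Prop := p ≠ ""
instance (s : String) (p : String) : Decidable (Pre_check s p) := by unfold Pre_check; infer_instance

def pvWitness_check : String × String := ("abca", "b@a")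

def Spec_check (s : String) (p : String) (out : Int) : Prop := out = check_alt s p
instance (s : String) (p : String) (out : Int) : Decidable (Spec_check s p out) := by unfold Spec_check; infer_instance

-- ===== CLAIM (what is proved, stated in full; the proofs are below) =====
def Claim_equal_check : Prop := ∀ (s : String) (p : String), Dom_check s p → Pre_check s p → Spec_check s p (check s p)

-- ===== LEMMAS AND PROOFS =====

-- B's per-position test at Nat indices (B's orientation of the two comparisons).
def okAt (sl pl : List Char) (i j : Nat) : Bool :=
  (pl.getD j ' ' == '@' || pl.getD j ' ' == sl.getD (i + j) ' ')

-- The tail of B's search, starting at position i.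
def altFrom (sl pl : List Char) (i : Int) : Int :=
  match (PySem.List.pyRange i ((sl.length : Int) - (pl.length : Int) + 1) 1).find? (pmatch sl pl) with
  | some k => k
  | none => -1

theorem altFrom_nil (sl pl : List Char) (i : Int)
    (h : (sl.length : Int) - (pl.length : Int) + 1 ≤ i) : altFrom sl pl i = -1 := by
  unfold altFrom
  rw [PySem.List.pyRange_one_eq_nil h]
  rfl

theorem altFrom_cons (sl pl : List Char) (i : Int)
    (h : i < (sl.length : Int) - (pl.length : Int) + 1) :
    altFrom sl pl i = if pmatch sl pl i then i else altFrom sl pl (i + 1) := by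
  unfold altFrom
  rw [PySem.List.pyRange_one_cons h]
  by_cases hp : pmatch sl pl i
  · rw [List.find?_cons_of_pos hp, if_pos hp]
  · rw [List.find?_cons_of_neg (by simpa using hp), if_neg hp]

theorem pmatch_iff (sl pl : List Char) (i : Nat) (h : i + pl.length ≤ sl.length) :
    pmatch sl pl (i : Int) = true ↔ ∀ j < pl.length, okAt sl pl i j = true := by
  unfold pmatch
  rw [PySem.List.pyRange_zero_nat, List.all_map, List.all_eq_true]
  constructor
  · intro hall j hj
    have := hall j (List.mem_range.mpr hj)
    have hij : i + j < sl.length := by omega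
    simp only [Function.comp, PySem.List.pyGet?_natCast] at this
    rw [show ((i : Int) + (j : Int)) = ((i + j : Nat) : Int) by push_cast; ring,
        PySem.List.pyGet?_natCast] at this
    rw [List.getElem?_eq_getElem hj, List.getElem?_eq_getElem hij] at this
    simpa [okAt, List.getD_eq_getElem pl ' ' hj, List.getD_eq_getElem sl ' ' hij,
           List.getElem?_eq_getElem hj, List.getElem?_eq_getElem hij] using this
  · intro hall j hjm
    have hj := List.mem_range.mp hjm
    have hij : i + j < sl.length := by omega
    simp only [Function.comp, PySem.List.pyGet?_natCast]
    rw [show ((i : Int) + (j : Int)) = ((i + j : Nat) : Int) by push_cast; ring,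
        PySem.List.pyGet?_natCast]
    rw [List.getElem?_eq_getElem hj, List.getElem?_eq_getElem hij]
    have := hall j hj
    simpa [okAt, List.getD_eq_getElem pl ' ' hj, List.getD_eq_getElem sl ' ' hij,
           List.getElem?_eq_getElem hj, List.getElem?_eq_getElem hij] using this

-- A's guard Boolean equals B's okAt (the two == tests commuted).
theorem guard_eq_okAt (sl pl : List Char) (i c : Nat) (hc : c < pl.length)
    (hic : i + c < sl.length) :
    (sl[i + c]'hic == pl[c]'hc || pl[c]'hc == '@') = okAt sl pl i c := by
  rw [okAt, List.getD_eq_getElem pl ' ' hc, List.getD_eq_getElem sl ' ' hic,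
      Bool.beq_comm (a := sl[i + c]'hic), Bool.or_comm]

-- A's full-match success at i agrees with B.
theorem altFrom_hit (sl pl : List Char) (i : Nat) (him : i + pl.length ≤ sl.length)
    (hall : ∀ j < pl.length, okAt sl pl i j = true) : altFrom sl pl (i : Int) = i := by
  rw [altFrom_cons _ _ _ (by omega), if_pos ((pmatch_iff sl pl i him).mpr hall)]

-- A failed position lets B advance by one.
theorem altFrom_step (sl pl : List Char) (i : Nat)
    (j0 : Nat) (hj0 : j0 < pl.length) (hbad : okAt sl pl i j0 = false) :
    altFrom sl pl (i : Int) = altFrom sl pl ((i : Int) + 1) := by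
  by_cases him : i + pl.length ≤ sl.length
  · rw [altFrom_cons _ _ _ (by omega), if_neg]
    intro hp
    have := (pmatch_iff sl pl i him).mp hp j0 hj0
    rw [hbad] at this
    exact Bool.false_ne_true this
  · rw [altFrom_nil _ _ _ (by omega), altFrom_nil _ _ _ (by omega)]

-- Past the last feasible start position, B reports -1.
theorem altFrom_out (sl pl : List Char) (i : Nat) (h : sl.length < i + pl.length) :
    altFrom sl pl (i : Int) = -1 :=
  altFrom_nil _ _ _ (by omega)

-- The main correspondence: from a fresh state (counter 0, start i) A's loop computes
-- B's search from i; from a partial-match state (counter c, start i+c, good_index i,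
-- the first c positions of the window at i already matched) it computes B's search
-- from i.  Strong induction on the fuel, which strictly decreases at every step.
theorem loop_eq (sl pl : List Char) (hm : 1 ≤ pl.length) : ∀ fuel : Nat,
    (∀ (i : Nat) (g : Int), i ≤ sl.length →
      (sl.length - i + 1) * (sl.length + 2) ≤ fuel →
      checkLoop sl pl (pl.length : Int) (sl.length : Int) fuel 0 (i : Int) g
        = altFrom sl pl (i : Int))
  ∧ (∀ (i c : Nat), 1 ≤ c → c < pl.length → i + c ≤ sl.length →
      (∀ j, j < c → okAt sl pl i j = true) →
      (sl.length - i) * (sl.length + 2) + (sl.length - i - c) + 1 ≤ fuel →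
      checkLoop sl pl (pl.length : Int) (sl.length : Int) fuel (c : Int) ((i + c : Nat) : Int) (i : Int)
        = altFrom sl pl (i : Int)) := by
  intro fuel
  induction fuel using Nat.strong_induction_on with
  | _ fuel IH =>
  constructor
  · -- fresh state
    intro i g hi hfuel
    have hKdef : (sl.length - i + 1) * (sl.length + 2)
        = (sl.length - i) * (sl.length + 2) + (sl.length + 2) := Nat.succ_mul _ _
    obtain ⟨f, rfl⟩ : ∃ f, fuel = f + 1 := by
      cases fuel with
      | zero =>
        exfalso
        rw [hKdef] at hfuel
        omega
      | succ f => exact ⟨f, rfl⟩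
    rw [hKdef] at hfuel
    set K := (sl.length - i) * (sl.length + 2) with hK
    simp only [checkLoop]
    by_cases hin : i < sl.length
    · rw [if_pos (by exact_mod_cast hin)]
      rw [PySem.List.pyGet?_natCast sl i, List.getElem?_eq_getElem hin,
          show (0 : Int) = ((0 : Nat) : Int) from rfl,
          PySem.List.pyGet?_natCast pl 0, List.getElem?_eq_getElem hm]
      have hg : (sl[i] == pl[0] || pl[0] == '@') = okAt sl pl i 0 := by
        have := guard_eq_okAt sl pl i 0 hm (by omega)
        simpa using this
      simp only [hg]
      by_cases hok : okAt sl pl i 0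
      · rw [if_pos hok]
        norm_num
        by_cases h1 : pl.length = 1
        · rw [if_pos (by omega)]
          exact (altFrom_hit sl pl i (by omega) (by
            intro j hj
            have : j = 0 := by omega
            subst this; exact hok)).symm
        · rw [if_neg (by omega)]
          have hprev1 : ∀ j, j < 1 → okAt sl pl i j = true := by
            intro j hj
            have hj0 : j = 0 := by omega
            subst hj0; exact hok
          have hfb : (sl.length - i) * (sl.length + 2) + (sl.length - i - 1) + 1 ≤ f := by
            rw [← hK]; omega
          have hinner := (IH f (by omega)).2 i 1 le_rfl (by omega) (by omega) hprev1 hfb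
          have e1 : ((1 : Nat) : Int) = 1 := rfl
          have e2 : ((i + 1 : Nat) : Int) = (i : Int) + 1 := by push_cast; ring
          rw [e1, e2] at hinner
          exact hinner
      · rw [if_neg hok]
        rw [if_neg (by omega)]
        norm_num
        have hfresh := (IH f (by omega)).1 (i + 1) g (by omega) (by
          have : sl.length - (i + 1) + 1 = sl.length - i := by omega
          rw [this, ← hK]; omega)
        have e2 : ((i + 1 : Nat) : Int) = (i : Int) + 1 := by push_cast; ring
        rw [e2] at hfresh
        rw [hfresh]
        exact (altFrom_step sl pl i 0 hm (by simpa using hok)).symm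
    · -- i = sl.length : loop exits, counter 0 < m, result -1
      rw [if_neg (by exact_mod_cast hin)]
      rw [if_neg (by omega)]
      exact (altFrom_out sl pl i (by omega)).symm
  · -- partial-match state
    intro i c hc1 hcm hicn hprev hfuel
    obtain ⟨f, rfl⟩ : ∃ f, fuel = f + 1 := by
      cases fuel with
      | zero => exfalso; omega
      | succ f => exact ⟨f, rfl⟩
    set K := (sl.length - i) * (sl.length + 2) with hK
    simp only [checkLoop]
    by_cases hin : i + c < sl.length
    · rw [if_pos (by exact_mod_cast hin)]
      rw [PySem.List.pyGet?_natCast sl (i + c), List.getElem?_eq_getElem hin,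
          PySem.List.pyGet?_natCast pl c, List.getElem?_eq_getElem hcm]
      simp only [guard_eq_okAt sl pl i c hcm hin]
      by_cases hok : okAt sl pl i c
      · rw [if_pos hok]
        rw [if_neg (by omega : ¬ ((c : Int) = 0))]
        by_cases hdone : c + 1 = pl.length
        · rw [if_pos (by omega)]
          exact (altFrom_hit sl pl i (by omega) (by
            intro j hj
            rcases Nat.lt_or_ge j c with h | h
            · exact hprev j h
            · have : j = c := by omega
              subst this; exact hok)).symm
        · rw [if_neg (by omega)]
          have hinner := (IH f (by omega)).2 i (c + 1) (by omega) (by omega) (by omega)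
            (by
              intro j hj
              rcases Nat.lt_or_ge j c with h | h
              · exact hprev j h
              · have : j = c := by omega
                subst this; exact hok)
            (by rw [← hK]; omega)
          have e1 : ((c + 1 : Nat) : Int) = (c : Int) + 1 := by push_cast; ring
          have e2 : ((i + (c + 1) : Nat) : Int) = ((i + c : Nat) : Int) + 1 := by push_cast; ring
          rw [e1, e2] at hinner
          exact hinner
      · rw [if_neg hok]
        rw [if_pos (by omega : ((c : Int) ≠ 0)), if_pos (by omega : ((i : Int) ≠ -1))]
        rw [if_neg (by omega)]
        have hfresh := (IH f (by omega)).1 (i + 1) (i : Int) (by omega) (by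
          have : sl.length - (i + 1) + 1 = sl.length - i := by omega
          rw [this, ← hK]; omega)
        have e2 : ((i + 1 : Nat) : Int) = (i : Int) + 1 := by push_cast; ring
        rw [e2] at hfresh
        rw [hfresh]
        exact (altFrom_step sl pl i c hcm (by simpa using hok)).symm
    · -- start hit the end of s with a partial match: A exits with -1
      rw [if_neg (by exact_mod_cast (by omega : ¬ (i + c < sl.length)))]
      rw [if_neg (by omega)]
      exact (altFrom_out sl pl i (by omega)).symm

-- ===== VERDICT (by name: the statement is the Claim_ definition above) =====
theorem check_spec : Claim_equal_check := by
  intro s p _ hpre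
  unfold Spec_check check check_alt
  have hm : 1 ≤ p.toList.length := by
    have : p.toList ≠ [] := by
      simpa [Pre_check, ← String.toList_eq_nil_iff] using hpre
    cases h : p.toList with
    | nil => exact absurd h this
    | cons a l => simp
  have h0 : ((0 : Nat) : Int) = 0 := rfl
  have := (loop_eq s.toList p.toList hm
      ((s.toList.length + 2) * (s.toList.length + 2))).1 0 (-1) (by omega)
    (by
      have : s.toList.length - 0 + 1 ≤ s.toList.length + 2 := by omega
      exact Nat.mul_le_mul_right _ this)
  rw [h0] at this
  rw [this]
  unfold altFrom
  simp
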